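-- pv_equiv track=rewrite | github.com/deepblue597/beaver | beaver/validator.py | _is_algorithm_model
-- ===== SOURCE A (Python) =====
-- def _is_algorithm_model(class_lower: str, type_lower: str) -> bool:
--     """Check if model is an algorithm model based on grammar/models.tx."""
--     # Algorithm categories from grammar/models.tx
--     algorithm_categories = {
--         'anomaly': [
--             'gaussianscorer', 'halfspacetrees', 'localoutlierfactor', 'oneclasssvm',
--             'predictiveanomalydetection', 'quantilefilter', 'standardabsolutedeviation',
--             'thresholdfilter'
--         ],
--         'linear_model': [
--             'almaclassifier', 'bayesianlinearregression', 'linearregression',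
--             'logisticregression', 'paclassifier', 'paregressor', 'perceptron',
--             'softmaxregression'
--         ],
--         'forest': [
--             'amfclassifier', 'amfregressor', 'arfclassifier', 'arfregressor', 'oxtregressor'
--         ],
--         'cluster': [
--             'clustream', 'dbstream', 'denstream', 'kmeans', 'odac', 'streamkmeans', 'textclust'
--         ],
--         'drift': [
--             'adwin', 'driftretrainingclassifier', 'dummydriftdetector', 'kswin',
--             'nodrift', 'pagehinkley'
--         ],
--         'drift_binary': [
--             'ddm', 'eddm', 'fhddm', 'hddm_a', 'hddm_w'
--         ],
--         'ensemble': [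
--             'adwinbaggingclassifier', 'adwinboostingclassifier', 'adaboostclassifier',
--             'boleclassifier', 'baggingclassifier', 'baggingregressor', 'ewaregressor',
--             'leveragingbaggingclassifier', 'srpclassifier', 'srpregressor',
--             'stackingclassifier', 'votingclassifier'
--         ],
--         'facto': [
--             'ffmclassifier', 'ffmregressor', 'fmclassifier', 'fmregressor',
--             'fwfmclassifier', 'fwfmregressor', 'hofmclassifier', 'hofmregressor'
--         ],
--         'imblearn': [
--             'chebyshevoversampler', 'chebyshevundersampler', 'hardsamplingclassifier',
--             'hardsamplingregressor', 'randomoversampler', 'randomsampler', 'randomundersampler'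
--         ],
--         'multiclass': [
--             'onevseoneclassifier', 'onevsrestclassifier', 'outputcodeclassifier'
--         ],
--         'multioutput': [
--             'classifierchain', 'montecarloclassifierchain', 'multiclassencoder',
--             'probabilisticclassifierchain', 'regressorchain'
--         ],
--         'model_selection': [
--             'banditclassifier', 'banditregressor', 'greedyregressor',
--             'successiveharvingclassifier', 'successiveharvingregressor'
--         ],
--         'bandit': [
--             'bayesucb', 'epsilongreedy', 'exp3', 'linucbdisjoint', 'randompolicy',
--             'thompsonsampling', 'ucb'
--         ],
--         'naive_bayes': [
--             'bernoullinb', 'complementnb', 'gaussiannb', 'multinomialnb'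
--         ],
--         'neighbors': [
--             'knnclassifier', 'knnregressor', 'lazysearch', 'swinn'
--         ],
--         'neural_net': [
--             'mlpregressor'
--         ],
--         'rules': [
--             'amrules'
--         ],
--         'time_series': [
--             'holtwinters', 'snarimax'
--         ],
--         'tree': [
--             'extremelyfastdecisiontreeclassifier', 'hoeffdingadaptivetreeclassifier',
--             'hoeffdingadaptivetreeregressor', 'hoeffdingtreeclassifier',
--             'hoeffdingtreeregressor', 'lastclassifier', 'sgtclassifier',
--             'sgtregressor', 'isouptreeregressor'
--         ]
--     }
--
--     # Check if it's in any algorithm category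
--     all_algorithms = []
--     for category_algorithms in algorithm_categories.values():
--         all_algorithms.extend(category_algorithms)
--
--     # Check class name patterns
--     algorithm_class_patterns = [
--         'linear_model', 'forest', 'cluster', 'drift', 'ensemble', 'facto',
--         'imblearn', 'multiclass', 'multioutput', 'model_selection', 'bandit',
--         'naive_bayes', 'neighbors', 'neural_net', 'rules', 'time_series', 'tree',
--         'anomaly'
--     ]
--
--     return any(x in class_lower for x in algorithm_class_patterns) or \
--            any(x in type_lower for x in all_algorithms)
-- ===== SOURCE B (Python) =====
-- # Fixed-length sliding-window matcher: for each distinct pattern length, slide a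
-- # window over the string and look the window up in a hash set of patterns -- the
-- # per-pattern substring scans of A disappear entirely.
--
-- _CLASS_WORDS = frozenset([
--     'linear_model', 'forest', 'cluster', 'drift', 'ensemble', 'facto',
--     'imblearn', 'multiclass', 'multioutput', 'model_selection', 'bandit',
--     'naive_bayes', 'neighbors', 'neural_net', 'rules', 'time_series', 'tree',
--     'anomaly'
-- ])
--
-- _TYPE_WORDS = frozenset([
--     'gaussianscorer', 'halfspacetrees', 'localoutlierfactor', 'oneclasssvm',
--     'predictiveanomalydetection', 'quantilefilter', 'standardabsolutedeviation',
--     'thresholdfilter',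
--     'almaclassifier', 'bayesianlinearregression', 'linearregression',
--     'logisticregression', 'paclassifier', 'paregressor', 'perceptron',
--     'softmaxregression',
--     'amfclassifier', 'amfregressor', 'arfclassifier', 'arfregressor', 'oxtregressor',
--     'clustream', 'dbstream', 'denstream', 'kmeans', 'odac', 'streamkmeans', 'textclust',
--     'adwin', 'driftretrainingclassifier', 'dummydriftdetector', 'kswin',
--     'nodrift', 'pagehinkley',
--     'ddm', 'eddm', 'fhddm', 'hddm_a', 'hddm_w',
--     'adwinbaggingclassifier', 'adwinboostingclassifier', 'adaboostclassifier',
--     'boleclassifier', 'baggingclassifier', 'baggingregressor', 'ewaregressor',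
--     'leveragingbaggingclassifier', 'srpclassifier', 'srpregressor',
--     'stackingclassifier', 'votingclassifier',
--     'ffmclassifier', 'ffmregressor', 'fmclassifier', 'fmregressor',
--     'fwfmclassifier', 'fwfmregressor', 'hofmclassifier', 'hofmregressor',
--     'chebyshevoversampler', 'chebyshevundersampler', 'hardsamplingclassifier',
--     'hardsamplingregressor', 'randomoversampler', 'randomsampler', 'randomundersampler',
--     'onevseoneclassifier', 'onevsrestclassifier', 'outputcodeclassifier',
--     'classifierchain', 'montecarloclassifierchain', 'multiclassencoder',
--     'probabilisticclassifierchain', 'regressorchain',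
--     'banditclassifier', 'banditregressor', 'greedyregressor',
--     'successiveharvingclassifier', 'successiveharvingregressor',
--     'bayesucb', 'epsilongreedy', 'exp3', 'linucbdisjoint', 'randompolicy',
--     'thompsonsampling', 'ucb',
--     'bernoullinb', 'complementnb', 'gaussiannb', 'multinomialnb',
--     'knnclassifier', 'knnregressor', 'lazysearch', 'swinn',
--     'mlpregressor',
--     'amrules',
--     'holtwinters', 'snarimax',
--     'extremelyfastdecisiontreeclassifier', 'hoeffdingadaptivetreeclassifier',
--     'hoeffdingadaptivetreeregressor', 'hoeffdingtreeclassifier',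
--     'hoeffdingtreeregressor', 'lastclassifier', 'sgtclassifier',
--     'sgtregressor', 'isouptreeregressor'
-- ])
--
-- _CLASS_LENS = {len(w) for w in _CLASS_WORDS}
-- _TYPE_LENS = {len(w) for w in _TYPE_WORDS}
--
--
-- def _any_window_in(s, lens, words):
--     """Does any fixed-length window of s belong to the pattern set?"""
--     for length in lens:
--         for i in range(len(s) - length + 1):
--             if s[i:i + length] in words:
--                 return True
--     return False
--
--
-- def _is_algorithm_model(class_lower: str, type_lower: str) -> bool:
--     return _any_window_in(class_lower, _CLASS_LENS, _CLASS_WORDS) or \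
--            _any_window_in(type_lower, _TYPE_LENS, _TYPE_WORDS)
-- ===== Notes on version B (the rewrite author's own statement) =====
-- stated objective: alternative
-- what changed: Replaces A's per-pattern substring scans (and the per-call flattening of the category dict) with a sliding-window matcher: for each distinct pattern length it slides a window over the string and looks the window up in a precomputed hash set of patterns, so no pattern list is scanned at match time.
import Mathlib
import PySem

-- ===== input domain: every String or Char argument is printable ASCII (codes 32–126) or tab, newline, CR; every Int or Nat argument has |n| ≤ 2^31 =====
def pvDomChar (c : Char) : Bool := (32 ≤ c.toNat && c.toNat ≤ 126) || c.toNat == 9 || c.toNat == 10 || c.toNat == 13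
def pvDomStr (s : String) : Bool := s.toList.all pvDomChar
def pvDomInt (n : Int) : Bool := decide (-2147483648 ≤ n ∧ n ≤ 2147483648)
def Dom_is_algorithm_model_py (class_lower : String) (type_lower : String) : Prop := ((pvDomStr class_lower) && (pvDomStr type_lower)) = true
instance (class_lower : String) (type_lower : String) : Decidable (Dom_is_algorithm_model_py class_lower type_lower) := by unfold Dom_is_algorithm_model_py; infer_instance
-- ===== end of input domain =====

-- B replaces A's per-pattern substring scans with a fixed-length sliding-window matcher
-- (for each distinct pattern length, every window of the string is looked up in a set of
-- patterns) — alternative algorithm, same observable result.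


-- ===== PORT A =====
-- the dict literal 'algorithm_categories'
def pyAlgorithmCategories : PySem.Dict String (List String) :=
  PySem.Dict.ofList [
    ("anomaly", ["gaussianscorer", "halfspacetrees", "localoutlierfactor", "oneclasssvm",
      "predictiveanomalydetection", "quantilefilter", "standardabsolutedeviation",
      "thresholdfilter"]),
    ("linear_model", ["almaclassifier", "bayesianlinearregression", "linearregression",
      "logisticregression", "paclassifier", "paregressor", "perceptron",
      "softmaxregression"]),
    ("forest", ["amfclassifier", "amfregressor", "arfclassifier", "arfregressor", "oxtregressor"]),
    ("cluster", ["clustream", "dbstream", "denstream", "kmeans", "odac", "streamkmeans", "textclust"]),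
    ("drift", ["adwin", "driftretrainingclassifier", "dummydriftdetector", "kswin",
      "nodrift", "pagehinkley"]),
    ("drift_binary", ["ddm", "eddm", "fhddm", "hddm_a", "hddm_w"]),
    ("ensemble", ["adwinbaggingclassifier", "adwinboostingclassifier", "adaboostclassifier",
      "boleclassifier", "baggingclassifier", "baggingregressor", "ewaregressor",
      "leveragingbaggingclassifier", "srpclassifier", "srpregressor",
      "stackingclassifier", "votingclassifier"]),
    ("facto", ["ffmclassifier", "ffmregressor", "fmclassifier", "fmregressor",
      "fwfmclassifier", "fwfmregressor", "hofmclassifier", "hofmregressor"]),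
    ("imblearn", ["chebyshevoversampler", "chebyshevundersampler", "hardsamplingclassifier",
      "hardsamplingregressor", "randomoversampler", "randomsampler", "randomundersampler"]),
    ("multiclass", ["onevseoneclassifier", "onevsrestclassifier", "outputcodeclassifier"]),
    ("multioutput", ["classifierchain", "montecarloclassifierchain", "multiclassencoder",
      "probabilisticclassifierchain", "regressorchain"]),
    ("model_selection", ["banditclassifier", "banditregressor", "greedyregressor",
      "successiveharvingclassifier", "successiveharvingregressor"]),
    ("bandit", ["bayesucb", "epsilongreedy", "exp3", "linucbdisjoint", "randompolicy",
      "thompsonsampling", "ucb"]),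
    ("naive_bayes", ["bernoullinb", "complementnb", "gaussiannb", "multinomialnb"]),
    ("neighbors", ["knnclassifier", "knnregressor", "lazysearch", "swinn"]),
    ("neural_net", ["mlpregressor"]),
    ("rules", ["amrules"]),
    ("time_series", ["holtwinters", "snarimax"]),
    ("tree", ["extremelyfastdecisiontreeclassifier", "hoeffdingadaptivetreeclassifier",
      "hoeffdingadaptivetreeregressor", "hoeffdingtreeclassifier",
      "hoeffdingtreeregressor", "lastclassifier", "sgtclassifier",
      "sgtregressor", "isouptreeregressor"])]

-- the list literal 'algorithm_class_patterns'
def pyAlgorithmClassPatterns : List String :=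
  ["linear_model", "forest", "cluster", "drift", "ensemble", "facto",
   "imblearn", "multiclass", "multioutput", "model_selection", "bandit",
   "naive_bayes", "neighbors", "neural_net", "rules", "time_series", "tree",
   "anomaly"]

def is_algorithm_model_py (class_lower : String) (type_lower : String) : Bool :=
  -- all_algorithms = []; for cat in dict.values(): all_algorithms.extend(cat)
  let all_algorithms : List String :=
    (pyAlgorithmCategories.values).foldl (fun acc cat => acc ++ cat) []
  (pyAlgorithmClassPatterns.any (fun x => PySem.Str.isIn x class_lower)) ||
    (all_algorithms.any (fun x => PySem.Str.isIn x type_lower))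

-- ===== PORT B =====
-- frozenset literals; iteration order of a Python set is irrelevant here because only
-- membership (for _WORDS) and an existential 'any' (for _LENS) are taken over them.
def altClassWordsList : List String :=
  ["linear_model", "forest", "cluster", "drift", "ensemble", "facto",
   "imblearn", "multiclass", "multioutput", "model_selection", "bandit",
   "naive_bayes", "neighbors", "neural_net", "rules", "time_series", "tree",
   "anomaly"]

def altTypeWordsList : List String :=
  ["gaussianscorer", "halfspacetrees", "localoutlierfactor", "oneclasssvm",
   "predictiveanomalydetection", "quantilefilter", "standardabsolutedeviation",
   "thresholdfilter",
   "almaclassifier", "bayesianlinearregression", "linearregression",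
   "logisticregression", "paclassifier", "paregressor", "perceptron",
   "softmaxregression",
   "amfclassifier", "amfregressor", "arfclassifier", "arfregressor", "oxtregressor",
   "clustream", "dbstream", "denstream", "kmeans", "odac", "streamkmeans", "textclust",
   "adwin", "driftretrainingclassifier", "dummydriftdetector", "kswin",
   "nodrift", "pagehinkley",
   "ddm", "eddm", "fhddm", "hddm_a", "hddm_w",
   "adwinbaggingclassifier", "adwinboostingclassifier", "adaboostclassifier",
   "boleclassifier", "baggingclassifier", "baggingregressor", "ewaregressor",
   "leveragingbaggingclassifier", "srpclassifier", "srpregressor",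
   "stackingclassifier", "votingclassifier",
   "ffmclassifier", "ffmregressor", "fmclassifier", "fmregressor",
   "fwfmclassifier", "fwfmregressor", "hofmclassifier", "hofmregressor",
   "chebyshevoversampler", "chebyshevundersampler", "hardsamplingclassifier",
   "hardsamplingregressor", "randomoversampler", "randomsampler", "randomundersampler",
   "onevseoneclassifier", "onevsrestclassifier", "outputcodeclassifier",
   "classifierchain", "montecarloclassifierchain", "multiclassencoder",
   "probabilisticclassifierchain", "regressorchain",
   "banditclassifier", "banditregressor", "greedyregressor",
   "successiveharvingclassifier", "successiveharvingregressor",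
   "bayesucb", "epsilongreedy", "exp3", "linucbdisjoint", "randompolicy",
   "thompsonsampling", "ucb",
   "bernoullinb", "complementnb", "gaussiannb", "multinomialnb",
   "knnclassifier", "knnregressor", "lazysearch", "swinn",
   "mlpregressor",
   "amrules",
   "holtwinters", "snarimax",
   "extremelyfastdecisiontreeclassifier", "hoeffdingadaptivetreeclassifier",
   "hoeffdingadaptivetreeregressor", "hoeffdingtreeclassifier",
   "hoeffdingtreeregressor", "lastclassifier", "sgtclassifier",
   "sgtregressor", "isouptreeregressor"]

def altClassWords : PySem.Set String := PySem.Set.ofList altClassWordsList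
def altTypeWords : PySem.Set String := PySem.Set.ofList altTypeWordsList

-- _LENS = {len(w) for w in _WORDS}; len(w) is a nonnegative character count, carried as Nat
def altClassLens : PySem.Set Nat := PySem.Set.ofList (altClassWordsList.map (fun w => w.toList.length))
def altTypeLens : PySem.Set Nat := PySem.Set.ofList (altTypeWordsList.map (fun w => w.toList.length))

-- for length in lens: for i in range(len(s) - length + 1): if s[i:i+length] in words: return True
-- range(len(s)-length+1) with a negative argument is empty, matched exactly by the
-- truncating Nat subtraction len(s)+1-length; the slice s[i:i+length] with 0 ≤ i is
-- ported by hand as take length of drop i, exact for nonnegative in-range bounds.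
def altAnyWindowIn (s : String) (lens : PySem.Set Nat) (words : PySem.Set String) : Bool :=
  lens.any (fun length =>
    (List.range (s.toList.length + 1 - length)).any (fun i =>
      PySem.Set.contains words (String.ofList ((s.toList.drop i).take length))))

def is_algorithm_model_py_alt (class_lower : String) (type_lower : String) : Bool :=
  altAnyWindowIn class_lower altClassLens altClassWords ||
    altAnyWindowIn type_lower altTypeLens altTypeWords

-- ===== PRECONDITION & SPEC =====
def Spec_is_algorithm_model_py (class_lower : String) (type_lower : String) (out : Bool) : Prop := out = is_algorithm_model_py_alt class_lower type_lower
instance (class_lower : String) (type_lower : String) (out : Bool) : Decidable (Spec_is_algorithm_model_py class_lower type_lower out) := by unfold Spec_is_algorithm_model_py; infer_instance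

-- ===== CLAIM (what is proved, stated in full; the proofs are below) =====
def Claim_equal_is_algorithm_model_py : Prop := ∀ (class_lower : String) (type_lower : String), Dom_is_algorithm_model_py class_lower type_lower → Spec_is_algorithm_model_py class_lower type_lower (is_algorithm_model_py class_lower type_lower)

-- ===== LEMMAS AND PROOFS =====
-- the sliding-window scan decides exactly 'some word of ws occurs as a substring of s'
theorem anyWindow_eq_any_isIn (s : String) (ws : List String) :
    altAnyWindowIn s (PySem.Set.ofList (ws.map (fun w => w.toList.length))) (PySem.Set.ofList ws)
      = ws.any (fun w => PySem.Str.isIn w s) := by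
  rw [Bool.eq_iff_iff]
  simp only [altAnyWindowIn, List.any_eq_true, List.mem_range, PySem.Set.mem_ofList,
    List.mem_map, PySem.Set.contains_iff, PySem.Str.isIn_eq]
  constructor
  · rintro ⟨L, -, i, -, hmem⟩
    refine ⟨_, hmem, ?_⟩
    rw [← PySem.Chars.exists_prefix_drop_iff_isIn]
    exact ⟨i, by simp [List.take_prefix]⟩
  · rintro ⟨w, hw, hIn⟩
    obtain ⟨j, hp⟩ := (PySem.Chars.exists_prefix_drop_iff_isIn _ _).mpr hIn
    by_cases hne : w.toList = []
    · refine ⟨w.toList.length, ⟨w, hw, rfl⟩, 0, by simp [hne], ?_⟩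
      have hw' : String.ofList [] = w := by rw [← hne, String.ofList_toList]
      simpa [hne, hw'] using hw
    · have hjlt : j < s.toList.length := by
        by_contra h
        exact hne (List.prefix_nil.mp (by
          simpa [List.drop_eq_nil_of_le (le_of_not_gt h)] using hp))
      have hlen : w.toList.length ≤ (s.toList.drop j).length := hp.length_le
      rw [List.length_drop] at hlen
      refine ⟨w.toList.length, ⟨w, hw, rfl⟩, j, by omega, ?_⟩
      have htake : (s.toList.drop j).take w.toList.length = w.toList :=
        (List.prefix_iff_eq_take.mp hp).symm
      rw [htake, String.ofList_toList]
      exact hw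

-- A's flattening of the dict's values is B's word list
theorem flatten_eq :
    (pyAlgorithmCategories.values).foldl (fun acc cat => acc ++ cat) [] = altTypeWordsList := by
  decide

-- ===== VERDICT (by name: the statement is the Claim_ definition above) =====
theorem is_algorithm_model_py_spec : Claim_equal_is_algorithm_model_py := by
  intro class_lower type_lower _
  show is_algorithm_model_py class_lower type_lower = is_algorithm_model_py_alt class_lower type_lower
  simp only [is_algorithm_model_py, is_algorithm_model_py_alt, flatten_eq,
    altClassWords, altTypeWords, altClassLens, altTypeLens, anyWindow_eq_any_isIn]
  rfl
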